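-- pv_equiv track=rewrite | github.com/salee1023/TIL | 3.Algorithm/00. 보충수업/두개의 숫자열.py | max_f
-- ===== SOURCE A (Python) =====
-- def max_f(S,L):
--     max_s = 0
--     for i in range(len(L)-len(S)+1):
--         arr = L[i:i+len(S)]
--         sum = 0
--         for j in range(len(S)):
--             sum += S[j]*arr[j]
--         if sum > max_s:
--             max_s = sum
--     return max_s
-- ===== SOURCE B (Python) =====
-- def max_f(S, L):
--     # Transposed traversal: instead of recomputing each window's dot product,
--     # maintain one partial sum per window position and sweep S once.
--     k = len(L) - len(S) + 1
--     if k <= 0: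
--         return 0
--     acc = [0] * k
--     for j, s in enumerate(S):
--         acc = [a + s * x for a, x in zip(acc, L[j:j+k])]
--     return max(0, max(acc))
-- ===== Notes on version B (the rewrite author's own statement) =====
-- stated objective: alternative
-- what changed: Transposed the loop nest: instead of slicing out each window and recomputing its dot product, B keeps one partial sum per window position and sweeps S once, updating all windows with a zip; the running max with strict > becomes max(0, max(acc)).
import Mathlib
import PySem

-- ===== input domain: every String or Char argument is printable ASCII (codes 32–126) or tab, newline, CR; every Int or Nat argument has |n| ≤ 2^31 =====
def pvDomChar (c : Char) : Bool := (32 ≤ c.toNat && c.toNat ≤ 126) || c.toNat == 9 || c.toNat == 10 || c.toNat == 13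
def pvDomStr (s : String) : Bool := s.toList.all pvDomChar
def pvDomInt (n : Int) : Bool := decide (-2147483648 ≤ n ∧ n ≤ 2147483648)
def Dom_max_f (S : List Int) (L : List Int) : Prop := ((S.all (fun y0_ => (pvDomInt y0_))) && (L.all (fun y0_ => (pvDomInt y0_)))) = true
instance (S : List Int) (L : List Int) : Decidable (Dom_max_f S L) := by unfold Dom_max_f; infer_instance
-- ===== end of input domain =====

-- B changes the traversal: one partial sum per window, swept once over S (alternative, same cost).

-- ===== PORT A =====
def max_f (S : List Int) (L : List Int) : Int :=
  (PySem.List.pyRange 0 ((L.length : Int) - (S.length : Int) + 1) 1).foldl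
    (fun max_s i =>
      let arr := PySem.List.slice L (some i) (some (i + (S.length : Int)))
      let sum := (PySem.List.pyRange 0 (S.length : Int) 1).foldl
        (fun sum j => sum + PySem.List.pyGetD S j 0 * PySem.List.pyGetD arr j 0) 0
      if sum > max_s then sum else max_s) 0

-- ===== PORT B =====
def max_f_alt (S : List Int) (L : List Int) : Int :=
  let k : Int := (L.length : Int) - (S.length : Int) + 1
  if k ≤ 0 then 0
  else
    let acc0 : List Int := List.replicate k.toNat 0
    let acc := (PySem.List.enumerate S 0).foldl
      (fun acc p => (acc.zip (PySem.List.slice L (some p.1) (some (p.1 + k)))).map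
        (fun q => q.1 + p.2 * q.2)) acc0
    -- max(acc): acc is nonempty here (k > 0), so the .getD 0 default is never used
    max 0 ((PySem.List.max? acc (fun y => y)).getD 0)

-- ===== PRECONDITION & SPEC =====
def Spec_max_f (S : List Int) (L : List Int) (out : Int) : Prop := out = max_f_alt S L
instance (S : List Int) (L : List Int) (out : Int) : Decidable (Spec_max_f S L out) := by unfold Spec_max_f; infer_instance

-- ===== CLAIM (what is proved, stated in full; the proofs are below) =====
def Claim_equal_max_f : Prop := ∀ (S : List Int) (L : List Int), Dom_max_f S L → Spec_max_f S L (max_f S L)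

-- ===== LEMMAS AND PROOFS =====

/-- window dot product -/
def pvDot (a b : List Int) : Int := ((a.zip b).map (fun q => q.1 * q.2)).sum

theorem pvDot_nil (b : List Int) : pvDot [] b = 0 := by simp [pvDot]

theorem pvDot_cons (x : Int) (xs : List Int) (y : Int) (ys : List Int) :
    pvDot (x :: xs) (y :: ys) = x * y + pvDot xs ys := by simp [pvDot]

theorem pvDot_take (a b : List Int) : pvDot a (b.take a.length) = pvDot a b := by
  induction a generalizing b with
  | nil => simp [pvDot]
  | cons x xs ih =>
    cases b with
    | nil => simp [pvDot]
    | cons y ys => simp only [List.length_cons, List.take_succ_cons, pvDot_cons, ih]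

theorem pvSum_range_dot (a b : List Int) (h : a.length ≤ b.length) :
    ((List.range a.length).map (fun j => a.getD j 0 * b.getD j 0)).sum = pvDot a b := by
  have hlist : (List.range a.length).map (fun j => a.getD j 0 * b.getD j 0)
      = (a.zip b).map (fun q => q.1 * q.2) := by
    apply List.ext_getElem
    · simp; omega
    · intro i h1 h2
      have hia : i < a.length := by simpa using h1
      have hib : i < b.length := by omega
      simp [List.getElem_zip, List.getElem?_eq_getElem hia, List.getElem?_eq_getElem hib]
  rw [hlist, pvDot]

theorem pvFoldl_max_max (t : List Int) (c a : Int) :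
    t.foldl max (max c a) = max c (t.foldl max a) := by
  induction t generalizing a with
  | nil => rfl
  | cons y t ih => simp only [List.foldl_cons, max_assoc, ih]

/-- B's loop invariant: sweeping the remaining suffix `S'` of S (enumerated from `j`)
    over a per-window accumulator adds each window's dot product with `S'`. -/
theorem pvStepB (L : List Int) (S' : List Int) : ∀ (j K : Nat) (kI : Int) (f : Nat → Int),
    kI = (K : Int) →
    j + S'.length + K ≤ L.length + 1 →
    (PySem.List.enumerate S' (j : Int)).foldl
      (fun acc p => (acc.zip (PySem.List.slice L (some p.1) (some (p.1 + kI)))).map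
        (fun q => q.1 + p.2 * q.2)) ((List.range K).map f)
    = (List.range K).map (fun i => f i + pvDot S' (L.drop (i + j))) := by
  induction S' with
  | nil =>
    intro j K kI f _ _
    simp [PySem.List.enumerate_nil, pvDot_nil]
  | cons x xs ih =>
    intro j K kI f hkI hle
    subst hkI
    have hle' : j + xs.length + 1 + K ≤ L.length + 1 := by simp at hle; omega
    rw [PySem.List.enumerate_cons, List.foldl_cons, PySem.List.slice_natCast_add]
    have hstep : (((List.range K).map f).zip ((L.drop j).take K)).map (fun q => q.1 + x * q.2)
        = (List.range K).map (fun i => f i + x * L.getD (j + i) 0) := by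
      apply List.ext_getElem
      · simp; omega
      · intro i h1 h2
        have hiK : i < K := by simpa using h2
        have hjb : j + i < L.length := by omega
        have hit : i < (L.drop j).length := by simp; omega
        simp [List.getElem_zip, List.getElem_take, List.getElem?_eq_getElem hjb]
    rw [hstep]
    have hcast : ((j : Int) + 1) = ((j + 1 : Nat) : Int) := by push_cast; ring
    rw [hcast, ih (j + 1) K (K : Int) (fun i => f i + x * L.getD (j + i) 0) rfl (by omega)]
    apply List.map_congr_left
    intro i hi
    have hiK : i < K := List.mem_range.mp hi
    have hib : i + j < L.length := by omega
    rw [List.drop_eq_getElem_cons hib, pvDot_cons,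
        List.getD_eq_getElem _ _ (by omega : j + i < L.length)]
    have : L[j + i]'(by omega) = L[i + j]'hib := by congr 1; omega
    rw [this]
    have : i + (j + 1) = i + j + 1 := by omega
    rw [this]
    ring

-- ===== VERDICT (by name: the statement is the Claim_ definition above) =====
theorem pvMax_run (x : Int) (t : List Int) :
    (x :: t).foldl max 0 = max 0 ((PySem.List.max? (x :: t) (fun y => y)).getD 0) := by
  rw [PySem.List.max?_id_cons, Option.getD_some, List.foldl_cons, pvFoldl_max_max]

theorem max_f_spec : Claim_equal_max_f := by
  intro S L _
  unfold Spec_max_f max_f max_f_alt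
  by_cases hk : (L.length : Int) - (S.length : Int) + 1 ≤ 0
  · rw [PySem.List.pyRange_one_eq_nil hk, if_pos hk]
    rfl
  · rw [if_neg hk]
    have hnm : S.length ≤ L.length := by omega
    have hK : ((L.length : Int) - (S.length : Int) + 1).toNat = L.length - S.length + 1 := by omega
    -- A's outer loop is a running max of the window dot products
    have hA : (PySem.List.pyRange 0 ((L.length : Int) - (S.length : Int) + 1) 1).foldl
        (fun max_s i =>
          let arr := PySem.List.slice L (some i) (some (i + (S.length : Int)))
          let sum := (PySem.List.pyRange 0 (S.length : Int) 1).foldl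
            (fun sum j => sum + PySem.List.pyGetD S j 0 * PySem.List.pyGetD arr j 0) 0
          if sum > max_s then sum else max_s) 0
        = (List.range (L.length - S.length + 1)).foldl
            (fun ms i => max ms (pvDot S (L.drop i))) 0 := by
      rw [PySem.List.pyRange_one 0 ((L.length : Int) - (S.length : Int) + 1), List.foldl_map]
      simp only [sub_zero, hK, zero_add]
      apply PySem.List.foldl_congr_mem
      intro ms i hi
      have hiK : i < L.length - S.length + 1 := List.mem_range.mp hi
      show (if ((PySem.List.pyRange 0 (S.length : Int) 1).foldl
              (fun sum j => sum + PySem.List.pyGetD S j 0 *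
                PySem.List.pyGetD (PySem.List.slice L (some (i : Int)) (some ((i : Int) + (S.length : Int)))) j 0) 0) > ms
            then ((PySem.List.pyRange 0 (S.length : Int) 1).foldl
              (fun sum j => sum + PySem.List.pyGetD S j 0 *
                PySem.List.pyGetD (PySem.List.slice L (some (i : Int)) (some ((i : Int) + (S.length : Int)))) j 0) 0)
            else ms) = max ms (pvDot S (L.drop i))
      rw [PySem.List.slice_natCast_add, PySem.List.foldl_add, PySem.List.pyRange_one]
      simp only [sub_zero, Int.toNat_natCast, List.map_map, zero_add]
      have hmap : (List.range S.length).map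
          ((fun j => PySem.List.pyGetD S j 0 * PySem.List.pyGetD ((L.drop i).take S.length) j 0)
            ∘ (fun k : Nat => (k : Int)))
          = (List.range S.length).map (fun j => S.getD j 0 * ((L.drop i).take S.length).getD j 0) := by
        apply List.map_congr_left
        intro j _
        simp [PySem.List.pyGetD_natCast]
      rw [hmap, pvSum_range_dot S _ (by simp; omega), pvDot_take]
      split_ifs <;> omega
    rw [hA, ← List.foldl_map (f := fun i => pvDot S (L.drop i)) (g := max)]
    simp only []
    -- B's accumulator ends as exactly that list of window dot products
    have hB : (PySem.List.enumerate S 0).foldl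
        (fun acc p => (acc.zip (PySem.List.slice L (some p.1)
            (some (p.1 + ((L.length : Int) - (S.length : Int) + 1))))).map
          (fun q => q.1 + p.2 * q.2))
        (List.replicate ((L.length : Int) - (S.length : Int) + 1).toNat 0)
        = (List.range (L.length - S.length + 1)).map (fun i => pvDot S (L.drop i)) := by
      have hstep := pvStepB L S 0 (L.length - S.length + 1)
        ((L.length : Int) - (S.length : Int) + 1) (fun _ => (0 : Int)) (by omega) (by omega)
      simp only [Nat.cast_zero, Nat.add_zero, zero_add] at hstep
      rw [hK, show List.replicate (L.length - S.length + 1) (0 : Int)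
            = (List.range (L.length - S.length + 1)).map (fun _ => (0 : Int)) from by simp,
          hstep]
    rw [hB]
    cases hl : (List.range (L.length - S.length + 1)).map (fun i => pvDot S (L.drop i)) with
    | nil => simp at hl
    | cons x t => rw [pvMax_run]
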